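-- pv_equiv track=rewrite | github.com/sweetdevilprincess/rp-engine | rp_engine/services/npc_engine.py | _trim_sections
-- ===== SOURCE A (Python) =====
-- def _trim_sections(content: str, sections: list[str], keep_intimate: bool = False) -> str:
--     """Remove named ## sections from markdown content."""
--     if not content or not sections:
--         return content
--
--     lines = content.split("\n")
--     result: list[str] = []
--     skipping = False
--
--     for line in lines:
--         if line.startswith("## ") and not line.startswith("### "):
--             heading = line[3:].strip()
--             skipping = any(s.lower() in heading.lower() for s in sections)
--
--         if not skipping:
--             result.append(line)
--
--     return "\n".join(result)
-- ===== SOURCE B (Python) =====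
-- def _trim_sections(content: str, sections: list[str], keep_intimate: bool = False) -> str:
--     """Remove named ## sections from markdown content (two-pass block version)."""
--     if not content or not sections:
--         return content
--
--     def is_heading(line: str) -> bool:
--         return line.startswith("## ") and not line.startswith("### ")
--
--     # Pass 1: partition the lines into a preamble block (head None) and one
--     # block per '## ' heading, each block carrying its lines.
--     blocks = []           # list of (heading_line_or_None, lines)
--     head = None
--     cur: list[str] = []
--     for line in content.split("\n"):
--         if is_heading(line):
--             blocks.append((head, cur))
--             head = line
--             cur = [line]
--         else:
--             cur.append(line)
--     blocks.append((head, cur))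
--
--     # Pass 2: keep the preamble and every block whose heading matches no section.
--     kept: list[str] = []
--     for head, blines in blocks:
--         if head is None or not any(s.lower() in head[3:].strip().lower() for s in sections):
--             kept.extend(blines)
--
--     return "\n".join(kept)
-- ===== Notes on version B (the rewrite author's own statement) =====
-- stated objective: alternative
-- what changed: Replaced the single stateful scan with a 'skipping' flag by a two-phase decomposition: first partition the lines into a preamble plus one block per '## ' heading, then filter whole blocks by their heading and rejoin.
import Mathlib
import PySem

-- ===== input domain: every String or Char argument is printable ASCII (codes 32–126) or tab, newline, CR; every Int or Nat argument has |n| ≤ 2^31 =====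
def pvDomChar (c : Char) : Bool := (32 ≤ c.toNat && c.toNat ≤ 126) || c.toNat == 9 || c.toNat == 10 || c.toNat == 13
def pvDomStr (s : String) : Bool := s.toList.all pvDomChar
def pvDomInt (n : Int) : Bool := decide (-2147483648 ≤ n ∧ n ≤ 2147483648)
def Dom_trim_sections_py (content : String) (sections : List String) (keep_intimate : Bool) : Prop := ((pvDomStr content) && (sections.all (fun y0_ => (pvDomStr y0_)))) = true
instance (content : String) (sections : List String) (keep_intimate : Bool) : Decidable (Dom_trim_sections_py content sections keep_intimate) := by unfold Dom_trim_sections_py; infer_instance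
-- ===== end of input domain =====

-- B restructures A's single stateful scan into a partition-into-blocks pass plus a block-filter pass; same behaviour, 'alternative' objective.

-- ===== PORT A =====
-- line.startswith("## ") and not line.startswith("### ")
def pvIsHeading (line : String) : Bool :=
  PySem.Str.startswith line "## " && !(PySem.Str.startswith line "### ")

-- any(s.lower() in line[3:].strip().lower() for s in sections)
def pvBadHeading (sections : List String) (line : String) : Bool :=
  sections.any (fun s =>
    PySem.Str.isIn (PySem.Str.lower s)
      (PySem.Str.lower (PySem.Str.strip (PySem.Str.slice line (some 3) none))))

def trim_sections_py (content : String) (sections : List String) (keep_intimate : Bool) : String :=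
  if content = "" ∨ sections = [] then content
  else
    let lines := (PySem.Str.split? content "\n").getD []
    let final := lines.foldl (fun (st : List String × Bool) line =>
      let skipping := if pvIsHeading line then pvBadHeading sections line else st.2
      (if skipping then st.1 else st.1 ++ [line], skipping)) ([], false)
    PySem.Str.join "\n" final.1

-- ===== PORT B =====
-- pass 1 state: (finished blocks, current block's heading (none = preamble), current block's lines)
def pvBStep (st : List (Option String × List String) × Option String × List String)
    (line : String) : List (Option String × List String) × Option String × List String :=
  if pvIsHeading line then (st.1 ++ [(st.2.1, st.2.2)], some line, [line])
  else (st.1, st.2.1, st.2.2 ++ [line])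

-- pass 2: keep preamble and non-matching blocks
def pvKeepStep (sections : List String) (acc : List String)
    (p : Option String × List String) : List String :=
  match p.1 with
  | none => acc ++ p.2
  | some h => if pvBadHeading sections h then acc else acc ++ p.2

def trim_sections_py_alt (content : String) (sections : List String) (keep_intimate : Bool) : String :=
  if content = "" ∨ sections = [] then content
  else
    let lines := (PySem.Str.split? content "\n").getD []
    let st := lines.foldl pvBStep ([], none, [])
    let blocks := st.1 ++ [(st.2.1, st.2.2)]
    let kept := blocks.foldl (pvKeepStep sections) []
    PySem.Str.join "\n" kept

-- ===== PRECONDITION & SPEC =====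
def Spec_trim_sections_py (content : String) (sections : List String) (keep_intimate : Bool) (out : String) : Prop := out = trim_sections_py_alt content sections keep_intimate
instance (content : String) (sections : List String) (keep_intimate : Bool) (out : String) : Decidable (Spec_trim_sections_py content sections keep_intimate out) := by unfold Spec_trim_sections_py; infer_instance

-- ===== CLAIM (what is proved, stated in full; the proofs are below) =====
def Claim_equal_trim_sections_py : Prop := ∀ (content : String) (sections : List String) (keep_intimate : Bool), Dom_trim_sections_py content sections keep_intimate → Spec_trim_sections_py content sections keep_intimate (trim_sections_py content sections keep_intimate)

-- ===== LEMMAS AND PROOFS =====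

-- the lines A's loop emits, as a forward recursion (proof-only helper)
def pvAGo (sections : List String) : List String → Bool → List String
  | [], _ => []
  | l :: ls, b =>
    let b' := if pvIsHeading l then pvBadHeading sections l else b
    (if b' then [] else [l]) ++ pvAGo sections ls b'

-- final skipping state of A's loop
def pvASkip (sections : List String) : List String → Bool → Bool
  | [], b => b
  | l :: ls, b => pvASkip sections ls (if pvIsHeading l then pvBadHeading sections l else b)

theorem pvAFold (sections : List String) (lines : List String) (res : List String) (b : Bool) :
    lines.foldl (fun (st : List String × Bool) line =>
      let skipping := if pvIsHeading line then pvBadHeading sections line else st.2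
      (if skipping then st.1 else st.1 ++ [line], skipping)) (res, b)
    = (res ++ pvAGo sections lines b, pvASkip sections lines b) := by
  induction lines generalizing res b with
  | nil => simp [pvAGo, pvASkip]
  | cons l ls ih =>
    cases hb' : (if pvIsHeading l then pvBadHeading sections l else b) <;>
      simp only [List.foldl_cons, pvAGo, pvASkip, hb'] <;> rw [ih] <;> simp

-- the lines that pass 2 keeps, as a flatMap
def pvKeptOf (sections : List String) (bs : List (Option String × List String)) : List String :=
  bs.flatMap (fun p =>
    match p.1 with
    | none => p.2
    | some h => if pvBadHeading sections h then [] else p.2)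

theorem pvKeepFold (sections : List String) (bs : List (Option String × List String))
    (acc : List String) :
    bs.foldl (pvKeepStep sections) acc = acc ++ pvKeptOf sections bs := by
  induction bs generalizing acc with
  | nil => simp [pvKeptOf]
  | cons p ps ih =>
    simp only [List.foldl_cons, ih, pvKeptOf, List.flatMap_cons]
    cases hp : p.1 with
    | none => simp [pvKeepStep, hp]
    | some h =>
      by_cases hb : pvBadHeading sections h = true
      · simp [pvKeepStep, hp, hb]
      · simp at hb; simp [pvKeepStep, hp, hb]

def pvBadOpt (sections : List String) : Option String → Bool
  | none => false
  | some h => pvBadHeading sections h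

-- key invariant: pass 1 + pass 2 produce exactly what A's scan emits, for any current state
theorem pvBInv (sections : List String) (lines : List String)
    (blocks : List (Option String × List String)) (head : Option String) (cur : List String) :
    (let st := lines.foldl pvBStep (blocks, head, cur)
     pvKeptOf sections (st.1 ++ [(st.2.1, st.2.2)]))
    = pvKeptOf sections (blocks ++ [(head, cur)]) ++ pvAGo sections lines (pvBadOpt sections head) := by
  induction lines generalizing blocks head cur with
  | nil => simp [pvAGo]
  | cons l ls ih =>
    rw [List.foldl_cons]
    by_cases hl : pvIsHeading l = true
    · rw [show pvBStep (blocks, head, cur) l = (blocks ++ [(head, cur)], some l, [l]) from by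
        simp [pvBStep, hl]]
      rw [ih]
      simp only [pvAGo, hl, if_true, pvBadOpt]
      cases hb : pvBadHeading sections l <;> simp [pvKeptOf, hb]
    · rw [show pvBStep (blocks, head, cur) l = (blocks, head, cur ++ [l]) from by
        simp [pvBStep, hl]]
      rw [ih]
      cases head with
      | none => simp [pvKeptOf, pvAGo, hl, pvBadOpt]
      | some h => cases hb : pvBadHeading sections h <;>
          simp [pvKeptOf, pvAGo, hl, pvBadOpt, hb]

-- ===== VERDICT (by name: the statement is the Claim_ definition above) =====
theorem trim_sections_py_spec : Claim_equal_trim_sections_py := by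
  intro content sections keep_intimate _
  unfold Spec_trim_sections_py trim_sections_py trim_sections_py_alt
  by_cases h : content = "" ∨ sections = []
  · simp [h]
  · simp only [if_neg h]
    rw [pvAFold]
    have := pvBInv sections ((PySem.Str.split? content "\n").getD []) [] none []
    simp only at this
    rw [pvKeepFold, this]
    simp [pvKeptOf, pvBadOpt]
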